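-- pv_equiv track=rewrite | github.com/mingchaowu5/plagiarism-detector | plag-detector/jplag_results/temp/76-perceptron.py | get_count_all_words_in_negative
-- ===== SOURCE A (Python) =====
-- def get_count_all_words_in_negative(negative_list):
--     mydict = dict()
--     sum = 0
--     for i in negative_list:
--         for j in i:
--             for p in j.split(' '):
--                 key = p
--                 v = p
--                 mydict.setdefault(key, []).append(v)
--     for key, value in mydict.items():
--         v = len(value)
--         mydict[key] = v
--     for v in mydict.values():
--         sum += v
--
--     return mydict, sum
-- ===== SOURCE B (Python) =====
-- def get_count_all_words_in_negative(negative_list):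
--     words = [p for i in negative_list for j in i for p in j.split(' ')]
--     counts = {}
--     for w in words:
--         if w not in counts:
--             counts[w] = words.count(w)
--     return counts, len(words)
-- ===== Notes on version B (the rewrite author's own statement) =====
-- stated objective: alternative
-- what changed: B first flattens everything into one word list, then fills the dict by a count-per-distinct-word scan (words.count on first occurrence) and returns len(words) as the total, instead of A's incremental setdefault/append grouping followed by a length-conversion pass and a summation pass.
import Mathlib
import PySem

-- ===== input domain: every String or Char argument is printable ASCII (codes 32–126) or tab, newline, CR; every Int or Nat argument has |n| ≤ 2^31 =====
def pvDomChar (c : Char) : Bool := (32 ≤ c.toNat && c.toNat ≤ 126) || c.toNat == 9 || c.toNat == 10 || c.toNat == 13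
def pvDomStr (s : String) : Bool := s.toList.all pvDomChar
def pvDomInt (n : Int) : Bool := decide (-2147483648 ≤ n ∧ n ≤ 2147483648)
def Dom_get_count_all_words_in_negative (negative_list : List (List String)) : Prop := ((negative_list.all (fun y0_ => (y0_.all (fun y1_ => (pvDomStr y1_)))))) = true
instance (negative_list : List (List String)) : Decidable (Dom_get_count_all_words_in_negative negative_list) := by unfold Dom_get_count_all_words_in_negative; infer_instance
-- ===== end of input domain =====

-- B flattens all words into one list, then fills the dict by counting each distinct word
-- with words.count on its first occurrence, returning len(words) as the total (objective:
-- alternative decomposition; same return value).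

-- j.split(' ') — sep is nonempty, so split? is always some (exact)
def pvSplit (j : String) : List String := (PySem.Str.split? j " ").getD []

-- ===== PORT A =====
-- Python local 'mydict' after the triple loop; setdefault(key, []).append(v) == modify key [] (· ++ [v]) (exact)
def pvA_mydict (negative_list : List (List String)) : PySem.Dict String (List String) :=
  negative_list.foldl (fun d i =>
    i.foldl (fun d j =>
      (pvSplit j).foldl (fun d p => d.modify p [] (· ++ [p])) d) d)
    PySem.Dict.empty

-- Python's second loop: for key, value in mydict.items(): mydict[key] = len(value)
def pvA_mydict2 (negative_list : List (List String)) : PySem.Dict String Int :=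
  (pvA_mydict negative_list).items.foldl
    (fun d kv => d.insert kv.1 (kv.2.length : Int)) PySem.Dict.empty

def get_count_all_words_in_negative (negative_list : List (List String)) : (List (String × Int)) × Int :=
  -- third loop: for v in mydict.values(): sum += v
  ((pvA_mydict2 negative_list).items,
   (pvA_mydict2 negative_list).values.foldl (· + ·) 0)

-- ===== PORT B =====
-- the flat comprehension: words = [p for i in negative_list for j in i for p in j.split(' ')]
def pvB_words (negative_list : List (List String)) : List String :=
  negative_list.flatMap (fun i => i.flatMap pvSplit)

def get_count_all_words_in_negative_alt (negative_list : List (List String)) : (List (String × Int)) × Int :=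
  -- for w in words: if w not in counts: counts[w] = words.count(w)  (words = pvB_words negative_list)
  (((pvB_words negative_list).foldl (fun d w => if d.contains w then d
        else d.insert w (((pvB_words negative_list).count w : Int))) PySem.Dict.empty).items,
   ((pvB_words negative_list).length : Int))

-- ===== PRECONDITION & SPEC =====
def Spec_get_count_all_words_in_negative (negative_list : List (List String)) (out : (List (String × Int)) × Int) : Prop := out = get_count_all_words_in_negative_alt negative_list
instance (negative_list : List (List String)) (out : (List (String × Int)) × Int) : Decidable (Spec_get_count_all_words_in_negative negative_list out) := by unfold Spec_get_count_all_words_in_negative; infer_instance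

-- ===== CLAIM (what is proved, stated in full; the proofs are below) =====
def Claim_equal_get_count_all_words_in_negative : Prop := ∀ (negative_list : List (List String)), Dom_get_count_all_words_in_negative negative_list → Spec_get_count_all_words_in_negative negative_list (get_count_all_words_in_negative negative_list)

-- ===== LEMMAS AND PROOFS =====

theorem pv_nested_foldl {σ : Type} (f : σ → String → σ) (nl : List (List String)) (z : σ) :
    nl.foldl (fun s i => i.foldl (fun s j => (pvSplit j).foldl f s) s) z
      = (pvB_words nl).foldl f z := by
  simp only [pvB_words, List.foldl_flatMap]

-- first-occurrence dedup, unfolded one step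
theorem pv_dedup_cons (w : String) (rest : List String) :
    PySem.List.dedup (w :: rest)
      = w :: (PySem.List.dedup rest).filter (fun x => !(x == w)) := by
  have h := PySem.Set.update_eq_append_filter (s := [w]) (xs := rest)
  have h0 : PySem.Set.update [w] rest = PySem.List.dedup (w :: rest) := by
    simp [PySem.Set.update, PySem.List.dedup_eq_ofList, PySem.Set.ofList_eq_foldl,
      List.foldl_cons, PySem.Set.add, PySem.Set.contains]
  rw [h0] at h
  rw [h]
  simp only [PySem.List.dedup_eq_ofList, List.singleton_append, List.cons.injEq, true_and]
  refine List.filter_congr fun x _ => ?_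
  by_cases hx : x = w <;> simp [hx, PySem.Set.contains]

-- B's first-occurrence insert loop, characterised
theorem pv_b_fold_items (ws : List String) (c : String → Int) :
    ∀ d : PySem.Dict String Int,
    (ws.foldl (fun d w => if d.contains w then d else d.insert w (c w)) d).items
      = d.items ++ ((PySem.List.dedup ws).filter (fun k => !(d.contains k))).map
          (fun k => (k, c k)) := by
  induction ws with
  | nil => intro d; simp
  | cons w rest ih =>
    intro d
    rw [List.foldl_cons, pv_dedup_cons]
    by_cases hc : d.contains w = true
    · rw [if_pos hc, ih d]
      congr 2
      simp only [List.filter_cons, hc, Bool.not_true, List.filter_filter]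
      refine (List.filter_congr ?_).symm
      intro x hx
      by_cases hxw : x == w
      · have : d.contains x = true := by
          have : x = w := by simpa using hxw
          rw [this]; exact hc
        simp [this]
      · simp [hxw]
    · have hcf : d.contains w = false := by simpa using hc
      rw [if_neg hc, ih (d.insert w (c w))]
      simp only [PySem.Dict.items_insert, hcf, Bool.false_eq_true, reduceIte,
        List.filter_cons, Bool.not_false, if_true, List.filter_filter,
        List.map_cons, List.append_assoc, List.cons_append, List.nil_append]
      refine congrArg (d.items ++ ·) (congrArg (List.cons (w, c w))
        (congrArg (List.map fun k => (k, c k)) (List.filter_congr fun x _ => ?_)))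
      simp [PySem.Dict.contains_insert, Bool.not_or, Bool.and_comm]

theorem pv_alt_eq (nl : List (List String)) :
    get_count_all_words_in_negative_alt nl
      = ((PySem.Dict.counter (pvB_words nl)).items, ((pvB_words nl).length : Int)) := by
  unfold get_count_all_words_in_negative_alt
  rw [pv_b_fold_items, PySem.Dict.items_counter]
  simp [PySem.Dict.empty, PySem.List.dedup_eq_ofList]

-- A's stage-1 dict, characterised
theorem pv_stage1_items (ws : List String) :
    (ws.foldl (fun d p => d.modify p [] (· ++ [p])) PySem.Dict.empty).items
      = (PySem.Set.ofList ws).map (fun k => (k, ws.filter (fun p => p == k))) := by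
  have hnd : (ws.foldl (fun d p => d.modify p [] (· ++ [p])) PySem.Dict.empty).keys.Nodup := by
    have := PySem.Dict.nodup_keys_foldl_modify_key (κ := String) (β := String) ws id []
      (fun _ p => (· ++ [p])) PySem.Dict.empty (by simp)
    simpa using this
  have hkeys : (ws.foldl (fun d p => d.modify p [] (· ++ [p])) PySem.Dict.empty).keys
      = PySem.Set.ofList ws := by
    rw [PySem.Dict.keys_foldl_modify]
    simp [PySem.Dict.keys_empty, PySem.Set.update_nil_left]
  rw [PySem.Dict.items_eq_map_keys _ hnd [], hkeys]
  refine List.map_congr_left (fun k hk => ?_)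
  have hget : (ws.foldl (fun d p => d.modify p [] (· ++ [p])) PySem.Dict.empty).getD k []
      = (ws.filter (fun p => p == k)) := by
    have := PySem.Dict.getD_foldl_modify_append (κ := String) (β := String)
      (l := ws.map (fun p => (p, p))) (d := PySem.Dict.empty) (c := k)
    simp only [List.foldl_map] at this
    simpa [PySem.Dict.getD_empty, Function.comp_def, List.filter_map, List.map_map] using this
  rw [hget]

theorem pv_a_eq (nl : List (List String)) :
    get_count_all_words_in_negative nl
      = ((PySem.Dict.counter (pvB_words nl)).items,
          ((PySem.Dict.counter (pvB_words nl)).values.foldl (· + ·) 0)) := by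
  have h2 : pvA_mydict2 nl = PySem.Dict.counter (pvB_words nl) := by
    unfold pvA_mydict2 pvA_mydict
    rw [pv_nested_foldl, pv_stage1_items]
    apply PySem.Dict.ext
    have hfresh := PySem.Dict.items_foldl_insert_fresh
      (l := (PySem.Set.ofList (pvB_words nl)).map
        (fun k => (k, (pvB_words nl).filter (fun p => p == k))))
      (k := fun kv => kv.1) (v := fun kv => ((kv.2.length : Int)))
      (d := (PySem.Dict.empty : PySem.Dict String Int))
      (by intro a _; simp [PySem.Dict.contains_empty])
      (by simp [List.map_map, Function.comp_def, PySem.Set.nodup_ofList])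
    rw [hfresh, PySem.Dict.items_counter]
    simp [List.map_map, Function.comp_def, List.count_eq_countP, List.countP_eq_length_filter,
      PySem.Dict.empty]
  unfold get_count_all_words_in_negative
  rw [h2]

-- sum of the counter's values is the number of words
theorem pv_sum_counts (ws : List String) :
    (PySem.Dict.counter ws).values.foldl (· + ·) 0 = (ws.length : Int) := by
  have hval : (PySem.Dict.counter ws).values
      = (PySem.Set.ofList ws).map (fun k => ((ws.count k : Int))) := by
    rw [show (PySem.Dict.counter ws).values = (PySem.Dict.counter ws).items.map (·.2) from rfl,
      PySem.Dict.items_counter, List.map_map]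
    simp [Function.comp_def]
  rw [hval, ← List.sum_eq_foldl]
  have hperm : ((PySem.Set.ofList ws).map (fun k => ((ws.count k : Int)))).Perm
      (ws.dedup.map (fun k => ((ws.count k : Int)))) := by
    refine List.Perm.map _ ?_
    rw [List.perm_ext_iff_of_nodup (PySem.Set.nodup_ofList _) ws.nodup_dedup]
    intro x; simp [PySem.Set.mem_ofList, List.mem_dedup]
  rw [hperm.sum_eq, ← List.sum_map_count_dedup_eq_length ws, Nat.cast_list_sum,
    List.map_map]
  rfl

-- ===== VERDICT (by name: the statement is the Claim_ definition above) =====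
theorem get_count_all_words_in_negative_spec : Claim_equal_get_count_all_words_in_negative := by
  intro nl _
  show _ = _
  rw [pv_a_eq, pv_alt_eq, pv_sum_counts]
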